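-- pv_equiv track=rewrite | github.com/josubamadu/SudokuSolver | Helper.py | reduction
-- ===== SOURCE A (Python) =====
-- from collections import Counter
--
-- def reduction(u,currentSpan):
--     k = list(Counter(u).keys())
--     counts = Counter(u).values()
--     for idx, items in enumerate(counts):
--         if items == 1:
--             uniqueVal = k[idx]
--             for x in range(len(currentSpan)):
--                 if currentSpan[x] != None:
--                     if (uniqueVal in currentSpan[x]):
--                         l = [uniqueVal]
--                         currentSpan[x] = l
--     return currentSpan
-- ===== SOURCE B (Python) =====
-- from collections import Counter
--
-- def reduction(u, currentSpan):
--     # Faster: precompute rank (index in u) of each value occurring exactly once,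
--     # then one pass over the cells picking the lowest-rank single in each cell.
--     # Note: A mutates currentSpan in place; B builds a new list (return value equal).
--     counts = Counter(u)
--     rank = {}
--     for i, v in enumerate(u):
--         if counts[v] == 1:
--             rank[v] = i
--     result = []
--     for cell in currentSpan:
--         if cell is None:
--             result.append(None)
--             continue
--         best = None
--         for v in cell:
--             r = rank.get(v)
--             if r is not None and (best is None or r < best[0]):
--                 best = (r, v)
--         result.append([best[1]] if best is not None else cell)
--     return result
-- ===== Notes on version B (the rewrite author's own statement) =====
-- stated objective: faster
-- what changed: Instead of one full pass over all cells per single value (repeatedly overwriting cells), B precomputes each single's rank (its index in u) in one pass and then does a single pass over the cells, replacing each cell by its lowest-rank single if any.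
import Mathlib
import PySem

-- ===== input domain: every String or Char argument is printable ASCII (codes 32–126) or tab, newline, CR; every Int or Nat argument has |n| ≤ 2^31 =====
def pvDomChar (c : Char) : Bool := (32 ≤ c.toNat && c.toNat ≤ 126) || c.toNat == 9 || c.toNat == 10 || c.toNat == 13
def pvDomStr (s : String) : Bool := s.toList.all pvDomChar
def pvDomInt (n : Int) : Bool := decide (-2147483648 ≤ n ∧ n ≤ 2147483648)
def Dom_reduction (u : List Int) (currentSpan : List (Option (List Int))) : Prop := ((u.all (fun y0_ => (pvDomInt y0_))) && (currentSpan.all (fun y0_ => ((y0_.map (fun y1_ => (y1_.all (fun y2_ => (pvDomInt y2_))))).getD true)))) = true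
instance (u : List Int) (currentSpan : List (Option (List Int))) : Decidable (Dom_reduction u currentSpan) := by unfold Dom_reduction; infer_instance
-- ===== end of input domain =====

-- B replaces A's per-single full passes over the cells by one precomputed rank map plus a single
-- pass over the cells (lowest-rank single wins); A mutates currentSpan in place, B builds a new
-- list — the equivalence proved here is about the return value.


-- ===== PORT A =====
def reduction (u : List Int) (currentSpan : List (Option (List Int))) : List (Option (List Int)) :=
  let k := (PySem.Dict.counter u).keys
  let counts := (PySem.Dict.counter u).values
  (PySem.List.enumerate counts).foldl (fun span (p : Int × Int) =>
    if p.2 == 1 then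
      let uniqueVal := PySem.List.pyGetD k p.1 0
      (PySem.List.pyRange 0 (PySem.List.len span) 1).foldl (fun sp x =>
        match PySem.List.pyGetD sp x none with
        | none => sp
        | some cell =>
          if uniqueVal ∈ cell then PySem.List.pySetD sp x (some [uniqueVal]) else sp) span
    else span) currentSpan

-- ===== PORT B =====
def reduction_alt (u : List Int) (currentSpan : List (Option (List Int))) : List (Option (List Int)) :=
  let counts := PySem.Dict.counter u
  let rank := (PySem.List.enumerate u).foldl (fun d p =>
      if counts.getD p.2 0 == 1 then d.insert p.2 p.1 else d) PySem.Dict.empty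
  currentSpan.foldl (fun result cell =>
    match cell with
    | none => result ++ [none]
    | some c =>
      let best := c.foldl (fun best v =>
        match rank.get? v with
        | none => best
        | some r =>
          match best with
          | none => some (r, v)
          | some b => if r < b.1 then some (r, v) else best) none
      match best with
      | some b => result ++ [some [b.2]]
      | none => result ++ [some c]) []

-- ===== PRECONDITION & SPEC =====
def Spec_reduction (u : List Int) (currentSpan : List (Option (List Int))) (out : List (Option (List Int))) : Prop := out = reduction_alt u currentSpan
instance (u : List Int) (currentSpan : List (Option (List Int))) (out : List (Option (List Int))) : Decidable (Spec_reduction u currentSpan out) := by unfold Spec_reduction; infer_instance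

-- ===== CLAIM (what is proved, stated in full; the proofs are below) =====
def Claim_equal_reduction : Prop := ∀ (u : List Int) (currentSpan : List (Option (List Int))), Dom_reduction u currentSpan → Spec_reduction u currentSpan (reduction u currentSpan)

-- ===== LEMMAS AND PROOFS =====

-- A's inner pass applied to one cell: replace the cell by [s] if it contains s.
def applyS (s : Int) (cell : Option (List Int)) : Option (List Int) :=
  match cell with
  | none => none
  | some c => if s ∈ c then some [s] else some c

-- the singles of u, in order of occurrence in u
def singlesOf (u : List Int) : List Int := u.filter (fun v => u.count v == 1)

-- the common specification of one output cell
def specCell (u : List Int) (cell : Option (List Int)) : Option (List Int) :=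
  match cell with
  | none => none
  | some c =>
    match (singlesOf u).find? (fun s => decide (s ∈ c)) with
    | some s => some [s]
    | none => some c

-- A-side step 1 (auxiliary): the index loop, started past an already-processed prefix
theorem inner_aux (s : Int) :
    ∀ (zs ys : List (Option (List Int))),
    (PySem.List.pyRange (ys.length : Int) ((ys.length : Int) + (zs.length : Int)) 1).foldl
        (fun sp x =>
          match PySem.List.pyGetD sp x none with
          | none => sp
          | some cell =>
            if s ∈ cell then PySem.List.pySetD sp x (some [s]) else sp) (ys ++ zs)
      = ys ++ zs.map (applyS s) := by
  intro zs
  induction zs with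
  | nil => intro ys; simp [PySem.List.pyRange_one_eq_nil]
  | cons z zs ih =>
    intro ys
    simp only [List.length_cons, Nat.cast_add, Nat.cast_one, List.map_cons]
    rw [show ((ys.length : Int) + ((zs.length : Int) + 1)) = ((ys.length : Int) + 1) + (zs.length : Int) by ring]
    rw [PySem.List.pyRange_one_cons (by omega)]
    have hget : PySem.List.pyGetD (ys ++ z :: zs) (ys.length : Int) none = z := by
      simp
    have key : ∀ (w : Option (List Int)),
        (PySem.List.pyRange ((ys.length : Int) + 1) (((ys.length : Int) + 1) + (zs.length : Int)) 1).foldl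
          (fun sp x =>
            match PySem.List.pyGetD sp x none with
            | none => sp
            | some cell =>
              if s ∈ cell then PySem.List.pySetD sp x (some [s]) else sp) (ys ++ w :: zs)
        = ys ++ w :: zs.map (applyS s) := by
      intro w
      have h2 := ih (ys ++ [w])
      simp only [List.length_append, List.length_cons, List.length_nil, Nat.cast_add,
        Nat.cast_one, zero_add, List.append_assoc, List.singleton_append] at h2
      exact h2
    cases z with
    | none =>
      simp only [List.foldl_cons, hget]
      rw [key none]
      simp [applyS]
    | some c =>
      simp only [List.foldl_cons, hget]
      by_cases hc : s ∈ c
      · have hset : PySem.List.pySetD (ys ++ some c :: zs) (ys.length : Int) (some [s])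
            = ys ++ some [s] :: zs := by
          rw [PySem.List.pySetD_natCast]; simp
        simp only [hc, if_pos, hset]
        rw [key (some [s])]
        simp [applyS, hc]
      · simp only [hc, if_false]
        rw [key (some c)]
        simp [applyS, hc]

-- A-side step 1: the inner index-loop is a map over the cells
theorem inner_eq_map (s : Int) (sp : List (Option (List Int))) :
    (PySem.List.pyRange 0 (PySem.List.len sp) 1).foldl (fun sp x =>
        match PySem.List.pyGetD sp x none with
        | none => sp
        | some cell =>
          if s ∈ cell then PySem.List.pySetD sp x (some [s]) else sp) sp
      = sp.map (applyS s) := by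
  have h := inner_aux s sp []
  simpa using h

-- A-side step 2: folding maps is mapping folds
theorem foldl_map_fold (L : List Int) (sp : List (Option (List Int))) :
    L.foldl (fun sp s => sp.map (applyS s)) sp
      = sp.map (fun c => L.foldl (fun c s => applyS s c) c) := by
  induction L generalizing sp with
  | nil => simp
  | cons x L ih => simp [ih, List.map_map, Function.comp_def]

-- A-side step 3: the enumerate-over-counts loop walks the keys
theorem fold_enum (g : Int → Int) (step : List (Option (List Int)) → Int → List (Option (List Int))) :
    ∀ (K pre : List Int) (st : List (Option (List Int))),
    (PySem.List.enumerate (K.map g) (pre.length : Int)).foldl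
        (fun sp p => if p.2 == 1 then step sp (PySem.List.pyGetD (pre ++ K) p.1 0) else sp) st
      = K.foldl (fun sp v => if g v == 1 then step sp v else sp) st := by
  intro K
  induction K with
  | nil => intro pre st; simp
  | cons k K ih =>
    intro pre st
    rw [List.map_cons, PySem.List.enumerate_cons, List.foldl_cons]
    have hget : PySem.List.pyGetD (pre ++ k :: K) ((pre.length : Nat) : Int) 0 = k := by
      simp
    have h2 := ih (pre ++ [k]) (if g k == 1 then step st k else st)
    simp only [List.length_append, List.length_cons, List.length_nil, Nat.cast_add,
      Nat.cast_one, zero_add, List.append_assoc, List.singleton_append] at h2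
    simp only [hget]
    rw [List.foldl_cons]
    by_cases hk : g k == 1
    · simp only [hk, if_true] at h2 ⊢
      exact h2
    · simp only [hk] at h2 ⊢
      exact h2

-- keys of the counter filtered to single counts = u filtered to single counts
theorem filter_ofList (l : List Int) (p : Int → Bool)
    (H : ∀ v ∈ l, p v = true → l.count v = 1) :
    (PySem.Set.ofList l).filter p = l.filter p := by
  induction l with
  | nil => rfl
  | cons x xs ih =>
    have H' : ∀ v ∈ xs, p v = true → xs.count v = 1 := by
      intro v hv hp
      have h1 := H v (List.mem_cons_of_mem _ hv) hp
      rcases eq_or_ne v x with rfl | hne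
      · rw [List.count_cons_self] at h1
        have := List.count_pos_iff.mpr hv
        omega
      · simpa [List.count_cons, Ne.symm hne] using h1
    rw [PySem.Set.ofList_cons, List.filter_cons, List.filter_cons]
    by_cases hp : p x = true
    · have hx1 : (x :: xs).count x = 1 := H x List.mem_cons_self hp
      have hxnot : x ∉ xs := by
        intro hmem
        rw [List.count_cons_self] at hx1
        have := List.count_pos_iff.mpr hmem
        omega
      have hdis : PySem.Set.discard (PySem.Set.ofList xs) x = PySem.Set.ofList xs := by
        apply List.filter_eq_self.mpr
        intro y hy
        have : y ∈ xs := by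
          have := PySem.Set.mem_ofList (xs := xs) (y := y)
          tauto
        simp only [Bool.not_eq_eq_eq_not, Bool.not_true, beq_eq_false_iff_ne]
        exact fun h => hxnot (h ▸ this)
      simp only [hp, if_true, hdis, ih H']
    · simp only [hp]
      have : (PySem.Set.discard (PySem.Set.ofList xs) x).filter p
          = (PySem.Set.ofList xs).filter p := by
        unfold PySem.Set.discard
        rw [List.filter_filter]
        apply List.filter_congr
        intro y _
        by_cases hpy : p y = true
        · have hyx : (y == x) = false := by
            apply beq_eq_false_iff_ne.mpr
            intro h; exact hp (h ▸ hpy)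
          simp [hpy, hyx]
        · simp [Bool.eq_false_iff.mpr hpy]
      rw [this, ih H']

-- positions in l are strictly increasing along l.filter p, when p-elements occur once
theorem filter_pairwise_idxOf (l : List Int) (p : Int → Bool)
    (H : ∀ v ∈ l, p v = true → l.count v = 1) :
    (l.filter p).Pairwise (fun a b => l.idxOf a < l.idxOf b) := by
  induction l with
  | nil => simp
  | cons x xs ih =>
    have H' : ∀ v ∈ xs, p v = true → xs.count v = 1 := by
      intro v hv hp
      have h1 := H v (List.mem_cons_of_mem _ hv) hp
      rcases eq_or_ne v x with rfl | hne
      · rw [List.count_cons_self] at h1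
        have := List.count_pos_iff.mpr hv
        omega
      · simpa [List.count_cons, Ne.symm hne] using h1
    have hmemne : ∀ b ∈ xs.filter p, b ≠ x ∨ p x = false := by
      intro b hb
      by_cases hp : p x = true
      · left
        have hbxs := List.mem_of_mem_filter hb
        have hbp := List.of_mem_filter hb
        intro h
        subst h
        have h1 := H b List.mem_cons_self hp
        rw [List.count_cons_self] at h1
        have := List.count_pos_iff.mpr hbxs
        omega
      · right; exact Bool.eq_false_iff.mpr hp
    rw [List.filter_cons]
    have hshift : ∀ b ∈ xs.filter p, (x :: xs).idxOf b = xs.idxOf b + 1 := by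
      intro b hb
      rcases hmemne b hb with hne | hpx
      · rw [List.idxOf_cons_ne _ (fun h => hne h.symm)]
      · rw [List.idxOf_cons_ne]
        intro h
        rw [h] at hpx
        rw [List.of_mem_filter hb] at hpx
        exact Bool.true_eq_false.mp hpx
    have htail : (xs.filter p).Pairwise (fun a b => (x :: xs).idxOf a < (x :: xs).idxOf b) := by
      apply List.Pairwise.imp_of_mem _ (ih H')
      intro a b ha hb hab
      rw [hshift a ha, hshift b hb]
      omega
    by_cases hp : p x = true
    · simp only [hp, if_true]
      apply List.Pairwise.cons _ htail
      intro b hb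
      have hbne : b ≠ x := by
        rcases hmemne b hb with h | h
        · exact h
        · rw [hp] at h; exact absurd h (by simp)
      rw [List.idxOf_cons_self, hshift b hb]
      omega
    · simp only [hp]
      exact htail

-- A-side per-cell: folding applyS over a Nodup list finds the first member
theorem cell_fold (S : List Int) (hnd : S.Nodup) (c : List Int) :
    S.foldl (fun cell s => applyS s cell) (some c)
      = match S.find? (fun s => decide (s ∈ c)) with
        | some s => some [s]
        | none => some c := by
  induction S with
  | nil => rfl
  | cons s S ih =>
    rw [List.foldl_cons, List.find?_cons]
    by_cases hs : s ∈ c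
    · have h1 : applyS s (some c) = some [s] := by simp [applyS, hs]
      rw [h1]
      simp only [hs, decide_true]
      have hnot : s ∉ S := (List.nodup_cons.mp hnd).1
      clear ih hnd
      induction S with
      | nil => rfl
      | cons t S iht =>
        rw [List.foldl_cons]
        have hts : t ≠ s := fun h => hnot (h ▸ List.mem_cons_self)
        have h2 : applyS t (some [s]) = some [s] := by
          simp [applyS, hts]
        rw [h2]
        exact iht (fun h => hnot (List.mem_cons_of_mem _ h))
    · have h1 : applyS s (some c) = some c := by simp [applyS, hs]
      rw [h1]
      simp only [hs, decide_false]
      exact ih (List.nodup_cons.mp hnd).2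

theorem cell_fold_none (S : List Int) :
    S.foldl (fun cell s => applyS s cell) none = none := by
  induction S with
  | nil => rfl
  | cons s S ih => simpa [applyS] using ih

theorem singles_H (u : List Int) :
    ∀ v ∈ u, (u.count v == 1) = true → u.count v = 1 := by
  intro v _ h; simpa using h

theorem singles_nodup (u : List Int) : (singlesOf u).Nodup := by
  have h := filter_pairwise_idxOf u (fun v => u.count v == 1) (singles_H u)
  exact h.imp (fun hlt heq => by subst heq; exact lt_irrefl _ hlt)

-- A computes the spec
theorem reduction_eq_spec (u : List Int) (sp : List (Option (List Int))) :
    reduction u sp = sp.map (specCell u) := by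
  unfold reduction
  simp only [inner_eq_map, PySem.Dict.keys_counter, PySem.Dict.values,
    PySem.Dict.items_counter, List.map_map, Function.comp_def]
  have henum := fold_enum (fun v => ((u.count v : Nat) : Int))
      (fun sp v => sp.map (applyS v)) (PySem.Set.ofList u) [] sp
  simp only [List.nil_append, List.length_nil, Nat.cast_zero] at henum
  rw [henum]
  rw [PySem.List.foldl_if_eq_foldl_filter]
  have hfc : (PySem.Set.ofList u).filter (fun v => ((u.count v : Nat) : Int) == 1)
      = (PySem.Set.ofList u).filter (fun v => u.count v == 1) := by
    apply List.filter_congr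
    intro v _
    simp [Nat.cast_eq_one]
  rw [hfc, filter_ofList u _ (singles_H u)]
  rw [foldl_map_fold]
  apply List.map_congr_left
  intro cell _
  cases cell with
  | none => simpa [specCell] using cell_fold_none (singlesOf u)
  | some c =>
    rw [specCell]
    exact cell_fold (singlesOf u) (singles_nodup u) c

-- B-side: the rank dict
theorem rank_get? (u : List Int) (v : Int) :
    ((PySem.List.enumerate u).foldl (fun d p =>
        if (PySem.Dict.counter u).getD p.2 0 == 1 then d.insert p.2 p.1 else d)
        PySem.Dict.empty).get? v
      = if u.count v = 1 then some ((u.idxOf v : Int)) else none := by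
  have aux : ∀ (l : List Int) (s : Nat) (d : PySem.Dict Int Int),
      (∀ w ∈ l, u.count w = 1 → l.count w = 1) →
      ((PySem.List.enumerate l ((s : Nat) : Int)).foldl (fun d p =>
          if (PySem.Dict.counter u).getD p.2 0 == 1 then d.insert p.2 p.1 else d) d).get? v
        = if u.count v = 1 ∧ v ∈ l then some (((s : Nat) : Int) + (l.idxOf v : Int)) else d.get? v := by
    intro l
    induction l with
    | nil => intro s d _; simp [PySem.List.enumerate]
    | cons x l ih =>
      intro s d hl
      have hl' : ∀ w ∈ l, u.count w = 1 → l.count w = 1 := by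
        intro w hw hc
        have h1 := hl w (List.mem_cons_of_mem _ hw) hc
        rcases eq_or_ne w x with rfl | hne
        · rw [List.count_cons_self] at h1
          have := List.count_pos_iff.mpr hw
          omega
        · simpa [List.count_cons, Ne.symm hne] using h1
      rw [PySem.List.enumerate_cons, List.foldl_cons]
      have hcast : ((s : Nat) : Int) + 1 = (((s + 1 : Nat) : Nat) : Int) := by push_cast; ring
      by_cases hcx : u.count x = 1
      · have hguard : ((PySem.Dict.counter u).getD x 0 == 1) = true := by
          rw [PySem.Dict.getD_counter]
          simp [hcx]
        rw [if_pos hguard, hcast, ih (s + 1) _ hl']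
        dsimp only
        have hxnotl : x ∉ l := by
          have h1 := hl x List.mem_cons_self hcx
          rw [List.count_cons_self] at h1
          intro hmem
          have := List.count_pos_iff.mpr hmem
          omega
        rcases eq_or_ne v x with rfl | hne
        · rw [if_neg (by tauto), if_pos ⟨hcx, List.mem_cons_self⟩,
            PySem.Dict.get?_insert_self, List.idxOf_cons_self]
          simp
        · rw [PySem.Dict.get?_insert_of_ne _ _ hne]
          by_cases hc : u.count v = 1 ∧ v ∈ l
          · rw [if_pos hc, if_pos ⟨hc.1, List.mem_cons_of_mem _ hc.2⟩,
              List.idxOf_cons_ne _ (Ne.symm hne)]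
            push_cast
            congr 1
            ring
          · rw [if_neg hc, if_neg (by
              rintro ⟨h1, h2⟩
              rcases List.mem_cons.mp h2 with rfl | h3
              · exact hne rfl
              · exact hc ⟨h1, h3⟩)]
      · have hguard : ((PySem.Dict.counter u).getD x 0 == 1) = false := by
          rw [PySem.Dict.getD_counter]
          simp [Nat.cast_eq_one, hcx]
        rw [if_neg (by simpa [PySem.Dict.getD_counter, Nat.cast_eq_one] using hcx), hcast,
          ih (s + 1) _ hl']
        rcases eq_or_ne v x with rfl | hne
        · rw [if_neg (by tauto), if_neg (by tauto)]
        · by_cases hc : u.count v = 1 ∧ v ∈ l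
          · rw [if_pos hc, if_pos ⟨hc.1, List.mem_cons_of_mem _ hc.2⟩,
              List.idxOf_cons_ne _ (Ne.symm hne)]
            push_cast
            congr 1
            ring
          · rw [if_neg hc, if_neg (by
              rintro ⟨h1, h2⟩
              rcases List.mem_cons.mp h2 with rfl | h3
              · exact hne rfl
              · exact hc ⟨h1, h3⟩)]
  have h := aux u 0 PySem.Dict.empty (fun w _ hw => hw)
  simp only [Nat.cast_zero, zero_add, PySem.Dict.get?_empty] at h
  rw [h]
  by_cases hc : u.count v = 1
  · rw [if_pos ⟨hc, List.count_pos_iff.mp (by omega)⟩, if_pos hc]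
  · rw [if_neg (by tauto), if_neg hc]

-- the B-side running minimum step
def gstepK (key : Int → Int) (best : Option (Int × Int)) (v : Int) : Option (Int × Int) :=
  match best with
  | none => some (key v, v)
  | some b => if key v < b.1 then some (key v, v) else best

theorem foldMin (key : Int → Int) (M : List Int) :
    (M = [] ∧ M.foldl (gstepK key) none = none) ∨
    ∃ m, m ∈ M ∧ (∀ w ∈ M, key m ≤ key w) ∧ M.foldl (gstepK key) none = some (key m, m) := by
  induction M using List.reverseRecOn with
  | nil => left; exact ⟨rfl, rfl⟩
  | append_singleton M w ih =>
    rw [List.foldl_append, List.foldl_cons, List.foldl_nil]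
    rcases ih with ⟨hM, hf⟩ | ⟨m, hm, hmin, hf⟩
    · subst hM
      right
      exact ⟨w, by simp, by simp, by simp [gstepK]⟩
    · rw [hf]
      by_cases hlt : key w < key m
      · right
        refine ⟨w, by simp, ?_, by simp [gstepK, hlt]⟩
        intro x hx
        rcases List.mem_append.mp hx with hx | hx
        · exact le_of_lt (lt_of_lt_of_le hlt (hmin x hx))
        · simp at hx; subst hx; exact le_refl _
      · right
        refine ⟨m, by simp [hm], ?_, by simp [gstepK, hlt]⟩
        intro x hx
        rcases List.mem_append.mp hx with hx | hx
        · exact hmin x hx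
        · simp at hx; subst hx; exact le_of_not_gt hlt

theorem find?_first_min (key : Int → Int) (q : Int → Bool) :
    ∀ (S : List Int), S.Pairwise (fun a b => key a < key b) → ∀ s, S.find? q = some s →
      s ∈ S ∧ q s = true ∧ ∀ t ∈ S, q t = true → key s ≤ key t := by
  intro S
  induction S with
  | nil => intro _ s h; simp at h
  | cons x S ih =>
    intro hp s h
    rw [List.find?_cons] at h
    by_cases hq : q x = true
    · simp only [hq] at h
      have hs : s = x := (Option.some_inj.mp h).symm
      subst hs
      refine ⟨List.mem_cons_self, hq, ?_⟩
      intro t ht _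
      rcases List.mem_cons.mp ht with rfl | ht
      · exact le_refl _
      · exact le_of_lt (List.rel_of_pairwise_cons hp ht)
    · simp only [Bool.eq_false_iff.mpr hq] at h
      obtain ⟨hsS, hqs, hmin⟩ := ih (List.Pairwise.of_cons hp) s h
      refine ⟨List.mem_cons_of_mem _ hsS, hqs, ?_⟩
      intro t ht hqt
      rcases List.mem_cons.mp ht with rfl | ht
      · exact absurd hqt hq
      · exact hmin t ht hqt

theorem mem_singles (t : List Int) (v : Int) : v ∈ singlesOf t ↔ t.count v = 1 := by
  constructor
  · intro h
    have := List.of_mem_filter h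
    simpa using this
  · intro h
    exact List.mem_filter.mpr ⟨List.count_pos_iff.mp (by omega), by simp [h]⟩

theorem idx_inj (u : List Int) (a b : Int) (ha : a ∈ u) (hb : b ∈ u)
    (h : u.idxOf a = u.idxOf b) : a = b := by
  have h1 : u[u.idxOf a]'(List.idxOf_lt_length_of_mem ha) = a := List.getElem_idxOf _
  have h2 : u[u.idxOf b]'(List.idxOf_lt_length_of_mem hb) = b := List.getElem_idxOf _
  have h1' : u[u.idxOf b]'(List.idxOf_lt_length_of_mem hb) = a := by
    simp only [← h] at h2 ⊢
    exact h1
  exact h1'.symm.trans h2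

theorem pairwise_key (u : List Int) :
    (singlesOf u).Pairwise (fun a b => ((u.idxOf a : Nat) : Int) < ((u.idxOf b : Nat) : Int)) := by
  have h := filter_pairwise_idxOf u (fun v => u.count v == 1) (singles_H u)
  exact h.imp (fun hlt => by exact_mod_cast hlt)

-- B's per-cell computation meets the spec
theorem cell_alt (u : List Int) (c : List Int) :
    (match c.foldl (fun best v =>
        match ((PySem.List.enumerate u).foldl (fun d p =>
            if (PySem.Dict.counter u).getD p.2 0 == 1 then d.insert p.2 p.1 else d)
            PySem.Dict.empty).get? v with
        | none => best
        | some r =>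
          match best with
          | none => some (r, v)
          | some b => if r < b.1 then some (r, v) else best) none with
     | some b => some [b.2]
     | none => some c) = specCell u (some c) := by
  have hfun : (fun (best : Option (Int × Int)) (v : Int) =>
      match ((PySem.List.enumerate u).foldl (fun d p =>
          if (PySem.Dict.counter u).getD p.2 0 == 1 then d.insert p.2 p.1 else d)
          PySem.Dict.empty).get? v with
      | none => best
      | some r =>
        match best with
        | none => some (r, v)
        | some b => if r < b.1 then some (r, v) else best)
      = fun best v => if u.count v = 1 then gstepK (fun w => ((u.idxOf w : Nat) : Int)) best v else best := by
    funext best v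
    rw [rank_get? u v]
    by_cases hc : u.count v = 1
    · rw [if_pos hc, if_pos hc]
      cases best <;> rfl
    · rw [if_neg hc, if_neg hc]
  rw [hfun, PySem.List.foldl_ite_eq_foldl_filter]
  rcases foldMin (fun w => ((u.idxOf w : Nat) : Int)) (c.filter (fun v => decide (u.count v = 1)))
    with ⟨hM, hf⟩ | ⟨m, hm, hmin, hf⟩
  · rw [hf]
    have hfind : (singlesOf u).find? (fun s => decide (s ∈ c)) = none := by
      rw [List.find?_eq_none]
      intro s hs hsc
      have hs1 : u.count s = 1 := (mem_singles u s).mp hs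
      have : s ∈ c.filter (fun v => decide (u.count v = 1)) :=
        List.mem_filter.mpr ⟨of_decide_eq_true hsc, by simp [hs1]⟩
      rw [hM] at this
      simp at this
    simp [specCell, hfind]
  · rw [hf]
    have hmc : m ∈ c := List.mem_of_mem_filter hm
    have hm1 : u.count m = 1 := by simpa using List.of_mem_filter hm
    have hex : ∃ s, (singlesOf u).find? (fun s => decide (s ∈ c)) = some s := by
      rw [← Option.isSome_iff_exists, List.find?_isSome]
      exact ⟨m, (mem_singles u m).mpr hm1, by simpa using hmc⟩
    obtain ⟨s, hsf⟩ := hex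
    obtain ⟨hsS, hsc, hsmin⟩ := find?_first_min (fun w => ((u.idxOf w : Nat) : Int))
      (fun s => decide (s ∈ c)) (singlesOf u) (pairwise_key u) s hsf
    have hscc : s ∈ c := of_decide_eq_true hsc
    have hs1 : u.count s = 1 := (mem_singles u s).mp hsS
    have h1 : ((u.idxOf s : Nat) : Int) ≤ ((u.idxOf m : Nat) : Int) :=
      hsmin m ((mem_singles u m).mpr hm1) (by simpa using hmc)
    have h2 : ((u.idxOf m : Nat) : Int) ≤ ((u.idxOf s : Nat) : Int) :=
      hmin s (List.mem_filter.mpr ⟨hscc, by simp [hs1]⟩)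
    have hms : m = s := by
      apply idx_inj u m s
      · exact List.count_pos_iff.mp (by omega)
      · exact List.count_pos_iff.mp (by omega)
      · omega
    simp [specCell, hsf, hms]

-- the whole output list of B
theorem fold_cells (u : List Int) :
    ∀ (sp acc : List (Option (List Int))),
    sp.foldl (fun result cell =>
      match cell with
      | none => result ++ [none]
      | some c =>
        match c.foldl (fun best v =>
            match ((PySem.List.enumerate u).foldl (fun d p =>
                if (PySem.Dict.counter u).getD p.2 0 == 1 then d.insert p.2 p.1 else d)
                PySem.Dict.empty).get? v with
            | none => best
            | some r =>
              match best with
              | none => some (r, v)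
              | some b => if r < b.1 then some (r, v) else best) none with
        | some b => result ++ [some [b.2]]
        | none => result ++ [some c]) acc
      = acc ++ sp.map (specCell u) := by
  intro sp
  induction sp with
  | nil => intro acc; simp
  | cons cell sp ih =>
    intro acc
    rw [List.foldl_cons, List.map_cons]
    cases cell with
    | none =>
      rw [ih]
      simp [specCell]
    | some c =>
      have hcel := cell_alt u c
      cases hb : c.foldl (fun best v =>
          match ((PySem.List.enumerate u).foldl (fun d p =>
              if (PySem.Dict.counter u).getD p.2 0 == 1 then d.insert p.2 p.1 else d)
              PySem.Dict.empty).get? v with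
          | none => best
          | some r =>
            match best with
            | none => some (r, v)
            | some b => if r < b.1 then some (r, v) else best) none with
      | none =>
        rw [hb] at hcel
        simp only [hb]
        rw [ih]
        simp [← hcel]
      | some b =>
        rw [hb] at hcel
        simp only [hb]
        rw [ih]
        simp [← hcel]

-- B computes the spec
theorem reduction_alt_eq_spec (u : List Int) (sp : List (Option (List Int))) :
    reduction_alt u sp = sp.map (specCell u) := by
  unfold reduction_alt
  simpa using fold_cells u sp []

-- ===== VERDICT (by name: the statement is the Claim_ definition above) =====
theorem reduction_spec : Claim_equal_reduction := by
  intro u currentSpan _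
  unfold Spec_reduction
  rw [reduction_eq_spec, reduction_alt_eq_spec]
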